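-- pv_equiv track=rewrite | github.com/timisplump/urinal-test-data | model_data.py | min_number_of_neighbors
-- ===== SOURCE A (Python) =====
-- def min_number_of_neighbors(empty_indices, occupied_indices):
-- 	"""
-- 	Returns a tuple: (minimizing_indices, number_of_neighbors)
-- 	which refers to the location(s) with the least number of people
-- 	next to them at the stalls
-- 	"""
-- 	least_num_neighbors = 2
-- 	for index in empty_indices:
-- 		number_of_neighbors = 0
-- 		if index+1 in occupied_indices:
-- 			number_of_neighbors += 1
-- 		if index-1 in occupied_indices:
-- 			number_of_neighbors += 1
--
-- 		least_num_neighbors = min(number_of_neighbors, least_num_neighbors)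
--
-- 	minimizing_indices = []
--
-- 	for index in empty_indices:
-- 		number_of_neighbors = 0
-- 		if index+1 in occupied_indices:
-- 			number_of_neighbors += 1
-- 		if index-1 in occupied_indices:
-- 			number_of_neighbors += 1
--
-- 		if number_of_neighbors == least_num_neighbors:
-- 			minimizing_indices.append(index)
--
-- 	return (minimizing_indices, least_num_neighbors)
-- ===== SOURCE B (Python) =====
-- def min_number_of_neighbors(empty_indices, occupied_indices):
--     """Group-by table: bucket empty indices by neighbor count, then pick the min bucket."""
--     groups = {}
--     for index in empty_indices:
--         count = (index + 1 in occupied_indices) + (index - 1 in occupied_indices)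
--         groups[count] = groups.get(count, []) + [index]
--     least = min(groups) if groups else 2
--     return (groups.get(least, []), least)
-- ===== Notes on version B (the rewrite author's own statement) =====
-- stated objective: alternative
-- what changed: Replaces A's two full rescanning passes (one to find the minimum neighbor count, one to re-collect matching indices) with a single group-by pass that buckets indices by neighbor count into a dict, then selects the minimum-keyed bucket.
import Mathlib
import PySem

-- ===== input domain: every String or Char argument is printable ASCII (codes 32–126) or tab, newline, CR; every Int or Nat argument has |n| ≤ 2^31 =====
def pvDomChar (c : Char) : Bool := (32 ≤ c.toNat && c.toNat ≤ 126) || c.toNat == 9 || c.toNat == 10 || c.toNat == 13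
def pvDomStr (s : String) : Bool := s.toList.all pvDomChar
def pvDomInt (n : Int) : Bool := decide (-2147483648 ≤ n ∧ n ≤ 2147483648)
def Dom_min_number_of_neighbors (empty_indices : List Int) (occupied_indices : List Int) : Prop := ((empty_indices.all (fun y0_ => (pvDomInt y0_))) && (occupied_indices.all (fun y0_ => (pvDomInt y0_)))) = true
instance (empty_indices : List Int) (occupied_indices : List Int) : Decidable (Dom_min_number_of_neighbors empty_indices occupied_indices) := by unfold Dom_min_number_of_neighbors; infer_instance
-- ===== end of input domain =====

-- B replaces A's two rescanning passes by one group-by pass into a count-keyed dict; same cost, one pass (objective: alternative).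


-- ===== PORT A =====
def min_number_of_neighbors (empty_indices : List Int) (occupied_indices : List Int) : List Int × Int :=
  let least_num_neighbors : Int := empty_indices.foldl (fun least_num_neighbors index =>
    let number_of_neighbors : Int := 0
    let number_of_neighbors := if index + 1 ∈ occupied_indices then number_of_neighbors + 1 else number_of_neighbors
    let number_of_neighbors := if index - 1 ∈ occupied_indices then number_of_neighbors + 1 else number_of_neighbors
    min number_of_neighbors least_num_neighbors) 2
  let minimizing_indices : List Int := empty_indices.foldl (fun minimizing_indices index =>
    let number_of_neighbors : Int := 0
    let number_of_neighbors := if index + 1 ∈ occupied_indices then number_of_neighbors + 1 else number_of_neighbors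
    let number_of_neighbors := if index - 1 ∈ occupied_indices then number_of_neighbors + 1 else number_of_neighbors
    if number_of_neighbors = least_num_neighbors then minimizing_indices ++ [index] else minimizing_indices) []
  (minimizing_indices, least_num_neighbors)

-- ===== PORT B =====
def min_number_of_neighbors_alt (empty_indices : List Int) (occupied_indices : List Int) : List Int × Int :=
  let groups : PySem.Dict Int (List Int) := empty_indices.foldl (fun groups index =>
    let count : Int := (if index + 1 ∈ occupied_indices then 1 else 0) + (if index - 1 ∈ occupied_indices then 1 else 0)
    groups.modify count [] (fun l => l ++ [index])) PySem.Dict.empty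
  let least : Int := match PySem.List.min? groups.keys (fun x => x) with
    | some m => m
    | none => 2
  (groups.getD least [], least)

-- ===== PRECONDITION & SPEC =====
def Spec_min_number_of_neighbors (empty_indices : List Int) (occupied_indices : List Int) (out : List Int × Int) : Prop := out = min_number_of_neighbors_alt empty_indices occupied_indices
instance (empty_indices : List Int) (occupied_indices : List Int) (out : List Int × Int) : Decidable (Spec_min_number_of_neighbors empty_indices occupied_indices out) := by unfold Spec_min_number_of_neighbors; infer_instance

-- ===== CLAIM (what is proved, stated in full; the proofs are below) =====
def Claim_equal_min_number_of_neighbors : Prop := ∀ (empty_indices : List Int) (occupied_indices : List Int), Dom_min_number_of_neighbors empty_indices occupied_indices → Spec_min_number_of_neighbors empty_indices occupied_indices (min_number_of_neighbors empty_indices occupied_indices)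

-- ===== LEMMAS AND PROOFS =====

-- neighbor count of an index (the value both programs compute per element)
def pvCnt (o : List Int) (i : Int) : Int :=
  (if i + 1 ∈ o then 1 else 0) + (if i - 1 ∈ o then 1 else 0)

lemma pvCnt_le_two (o : List Int) (i : Int) : pvCnt o i ≤ 2 := by
  unfold pvCnt; split_ifs <;> omega

-- A's first loop is the running minimum of pvCnt with initial value 2
lemma leastA_eq (e o : List Int) :
    e.foldl (fun least index =>
      let n : Int := 0
      let n := if index + 1 ∈ o then n + 1 else n
      let n := if index - 1 ∈ o then n + 1 else n
      min n least) 2 = (e.map (pvCnt o)).foldl min 2 := by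
  rw [List.foldl_map]
  exact PySem.List.foldl_congr_mem' e _ _ 2 (fun x _ acc => by
    dsimp only; unfold pvCnt; split_ifs <;> omega)

-- B's groups dict: each bucket is the ordered filter of empty_indices by count
lemma groupsB_getD (e o : List Int) (c : Int) :
    (e.foldl (fun (g : PySem.Dict Int (List Int)) index =>
        let count : Int := (if index + 1 ∈ o then 1 else 0) + (if index - 1 ∈ o then 1 else 0)
        g.modify count [] (fun l => l ++ [index])) PySem.Dict.empty).getD c []
      = e.filter (fun i => pvCnt o i == c) := by
  have h : e.foldl (fun (g : PySem.Dict Int (List Int)) index =>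
        let count : Int := (if index + 1 ∈ o then 1 else 0) + (if index - 1 ∈ o then 1 else 0)
        g.modify count [] (fun l => l ++ [index])) PySem.Dict.empty
      = (e.map (fun i => (pvCnt o i, i))).foldl
          (fun (g : PySem.Dict Int (List Int)) p => g.modify p.1 [] (fun l => l ++ [p.2]))
          PySem.Dict.empty := by
    rw [List.foldl_map]; rfl
  rw [h, PySem.Dict.getD_foldl_modify_append]
  simp [List.filter_map, Function.comp_def]

-- B's groups dict: its key list is the dedup of the count list
lemma groupsB_keys (e o : List Int) :
    (e.foldl (fun (g : PySem.Dict Int (List Int)) index =>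
        let count : Int := (if index + 1 ∈ o then 1 else 0) + (if index - 1 ∈ o then 1 else 0)
        g.modify count [] (fun l => l ++ [index])) PySem.Dict.empty).keys
      = PySem.Set.ofList (e.map (pvCnt o)) := by
  exact PySem.Dict.keys_foldl_modify_key e (pvCnt o) ([] : List Int)
    (fun (_ : PySem.Dict Int (List Int)) (x : Int) => fun l => l ++ [x]) PySem.Dict.empty

-- B's least (min over the dict's keys, default 2) equals A's running minimum
lemma least_eq (e o : List Int) :
    (match PySem.List.min? (PySem.Set.ofList (e.map (pvCnt o))) (fun x => x) with
      | some m => m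
      | none => (2 : Int)) = (e.map (pvCnt o)).foldl min 2 := by
  cases hm : PySem.List.min? (PySem.Set.ofList (e.map (pvCnt o))) (fun x => x) with
  | none =>
    have hnil := (PySem.List.min?_eq_none_iff _ _).mp hm
    have he : e.map (pvCnt o) = [] := by
      by_contra hne
      obtain ⟨a, ha⟩ := List.exists_mem_of_ne_nil _ hne
      have hmem : a ∈ PySem.Set.ofList (e.map (pvCnt o)) := by
        rw [PySem.Set.mem_ofList]; exact ha
      rw [hnil] at hmem
      exact (List.not_mem_nil) hmem
    simp [he]
  | some m =>
    simp only
    have hmem : m ∈ e.map (pvCnt o) := by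
      have := PySem.List.min?_mem hm
      rwa [PySem.Set.mem_ofList] at this
    have hmin : ∀ y ∈ e.map (pvCnt o), m ≤ y := fun y hy =>
      PySem.List.min?_isMin hm y (by rwa [PySem.Set.mem_ofList])
    have hfle := PySem.List.foldl_min_le (e.map (pvCnt o)) 2
    have hfmem := PySem.List.foldl_min_mem (e.map (pvCnt o)) 2
    refine le_antisymm ?_ (hfle.2 m hmem)
    rcases hfmem with h2 | hin
    · rw [h2]
      obtain ⟨i, -, rfl⟩ := List.mem_map.mp hmem
      exact pvCnt_le_two o i
    · exact hmin _ hin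

-- ===== VERDICT (by name: the statement is the Claim_ definition above) =====
theorem min_number_of_neighbors_spec : Claim_equal_min_number_of_neighbors := by
  intro e o _
  unfold Spec_min_number_of_neighbors min_number_of_neighbors min_number_of_neighbors_alt
  simp only [groupsB_getD, groupsB_keys, least_eq, leastA_eq]
  refine Prod.ext ?_ rfl
  simp only
  rw [PySem.List.foldl_append_ite (p := fun index =>
        (let n : Int := 0
         let n := if index + 1 ∈ o then n + 1 else n
         let n := if index - 1 ∈ o then n + 1 else n
         n) = (e.map (pvCnt o)).foldl min 2) (f := fun x => x)]
  simp only [List.map_id', List.nil_append]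
  apply List.filter_congr
  intro i _
  have hb : (pvCnt o i == (e.map (pvCnt o)).foldl min 2)
      = decide (pvCnt o i = (e.map (pvCnt o)).foldl min 2) := by
    by_cases h : pvCnt o i = (e.map (pvCnt o)).foldl min 2 <;> simp [h]
  rw [hb, decide_eq_decide]
  unfold pvCnt
  split_ifs <;> omega
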